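-- pv_equiv track=rewrite | github.com/bmw/advent-of-code | 2015/11/solve.py | has_two_pairs
-- ===== SOURCE A (Python) =====
-- def has_two_pairs(password):
--     # idk if aaaa counts or only aabb. currently this code counts aaaa
--     last_char = None
--     pair_count = 0
--     for c in password:
--         if c == last_char:
--             pair_count += 1
--             if pair_count == 2:
--                 return True
--             last_char = None
--         else:
--             last_char = c
--     return False
-- ===== SOURCE B (Python) =====
-- def has_two_pairs(password):
--     # Run-length decomposition: split the string into maximal runs of equal
--     # characters, then each run of length k contributes k // 2 pairs.
--     lengths = []
--     i = 0
--     n = len(password)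
--     while i < n:
--         j = i
--         while j < n and password[j] == password[i]:
--             j += 1
--         lengths.append(j - i)
--         i = j
--     return sum(k // 2 for k in lengths) >= 2
-- ===== Notes on version B (the rewrite author's own statement) =====
-- stated objective: alternative
-- what changed: Replaces the stateful last_char/reset single scan with a run-length decomposition: the string is split into maximal runs of equal characters and the pair total is the arithmetic sum of run_length // 2 over the runs.
import Mathlib
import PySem

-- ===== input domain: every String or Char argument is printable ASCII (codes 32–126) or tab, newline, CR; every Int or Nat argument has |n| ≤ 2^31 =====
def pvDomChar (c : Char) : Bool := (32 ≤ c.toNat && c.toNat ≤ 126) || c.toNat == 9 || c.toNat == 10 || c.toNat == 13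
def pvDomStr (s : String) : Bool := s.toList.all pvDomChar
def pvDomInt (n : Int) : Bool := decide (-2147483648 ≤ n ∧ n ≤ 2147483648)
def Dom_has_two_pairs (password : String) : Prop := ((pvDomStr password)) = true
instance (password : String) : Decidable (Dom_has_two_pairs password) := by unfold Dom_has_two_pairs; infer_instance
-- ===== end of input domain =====

-- B replaces A's stateful last_char/reset scan by a run-length decomposition:
-- it splits the string into maximal runs of equal characters, then sums k // 2
-- over the run lengths and compares the total with 2 (alternative decomposition).


-- ===== PORT A =====
-- A's loop: state (last_char, pair_count), early return when pair_count hits 2.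
def pvALoop : List Char → Option Char → Int → Bool
  | [], _, _ => false
  | c :: rest, last, cnt =>
    if some c = last then
      if cnt + 1 = 2 then true
      else pvALoop rest none (cnt + 1)
    else pvALoop rest (some c) cnt

def has_two_pairs (password : String) : Bool :=
  pvALoop password.toList none 0

-- ===== PORT B =====
-- B's inner while loop: count how many further characters equal c, return the
-- count and the remaining suffix (Python's j - i - 1 extra steps past index i).
def pvRunExt (c : Char) : List Char → Nat × List Char
  | [] => (0, [])
  | d :: rest =>
    if d = c then
      let (k, r) := pvRunExt c rest
      (k + 1, r)
    else (0, d :: rest)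

theorem pvRunExt_len (c : Char) : ∀ (l : List Char), (pvRunExt c l).2.length ≤ l.length
  | [] => by simp [pvRunExt]
  | d :: rest => by
    by_cases h : d = c
    · have := pvRunExt_len c rest
      simp [pvRunExt, h]; omega
    · simp [pvRunExt, h]

-- B's outer while loop: the list of maximal run lengths.
def pvRunLengths : List Char → List Int
  | [] => []
  | c :: rest =>
    let p := pvRunExt c rest
    ((p.1 : Int) + 1) :: pvRunLengths p.2
termination_by l => l.length
decreasing_by
  have := pvRunExt_len c rest
  simp; omega

-- sum(k // 2 for k in lengths) >= 2
def has_two_pairs_alt (password : String) : Bool :=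
  decide (2 ≤ ((pvRunLengths password.toList).map (fun k => PySem.Int.floordiv k 2)).foldl (· + ·) 0)

-- ===== PRECONDITION & SPEC =====
def Spec_has_two_pairs (password : String) (out : Bool) : Prop := out = has_two_pairs_alt password
instance (password : String) (out : Bool) : Decidable (Spec_has_two_pairs password out) := by unfold Spec_has_two_pairs; infer_instance

-- ===== CLAIM (what is proved, stated in full; the proofs are below) =====
def Claim_equal_has_two_pairs : Prop := ∀ (password : String), Dom_has_two_pairs password → Spec_has_two_pairs password (has_two_pairs password)

-- ===== LEMMAS AND PROOFS =====

-- Proof-side bridge: the number of non-overlapping adjacent pairs, two-headed.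
def pvPairs : List Char → Nat
  | c1 :: c2 :: rest => if c1 = c2 then 1 + pvPairs rest else pvPairs (c2 :: rest)
  | _ => 0

-- A's loop decides 2 ≤ cnt + pairs, with last_char folded back onto the list.
theorem pvALoop_spec : ∀ (n : Nat) (l : List Char), l.length ≤ n → ∀ (cnt : Int), (cnt = 0 ∨ cnt = 1) →
    (pvALoop l none cnt = decide (2 ≤ cnt + pvPairs l)) ∧
    (∀ c, pvALoop l (some c) cnt = decide (2 ≤ cnt + pvPairs (c :: l))) := by
  intro n
  induction n with
  | zero =>
    intro l hl cnt hcnt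
    have : l = [] := List.length_eq_zero_iff.mp (Nat.le_zero.mp hl)
    subst this
    constructor
    · simp [pvALoop, pvPairs]; omega
    · intro c; simp [pvALoop, pvPairs]; omega
  | succ n ih =>
    intro l hl cnt hcnt
    cases l with
    | nil =>
      constructor
      · simp [pvALoop, pvPairs]; omega
      · intro c; simp [pvALoop, pvPairs]; omega
    | cons d rest =>
      have hlen : rest.length ≤ n := by simpa using Nat.succ_le_succ_iff.mp (by simpa using hl)
      constructor
      · have h := (ih rest hlen cnt hcnt).2 d
        simp [pvALoop, h]
      · intro c
        by_cases hdc : d = c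
        · subst hdc
          rcases hcnt with h0 | h1
          · subst h0
            have h := (ih rest hlen 1 (Or.inr rfl)).1
            simp [pvALoop, pvPairs, h]
          · subst h1
            simp [pvALoop, pvPairs]
            omega
        · have h := (ih rest hlen cnt hcnt).2 d
          simp [pvALoop, pvPairs, hdc, h, Ne.symm hdc]

theorem pvRunExt_shape (c : Char) : ∀ (l : List Char),
    l = List.replicate (pvRunExt c l).1 c ++ (pvRunExt c l).2 ∧
    (∀ d t, (pvRunExt c l).2 = d :: t → d ≠ c)
  | [] => by simp [pvRunExt]
  | d :: rest => by
    by_cases h : d = c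
    · subst h
      obtain ⟨h1, h2⟩ := pvRunExt_shape d rest
      refine ⟨?_, ?_⟩
      · simp [pvRunExt, List.replicate_succ]
        exact h1
      · intro e t ht
        exact h2 e t (by simpa [pvRunExt] using ht)
    · refine ⟨by simp [pvRunExt, h], ?_⟩
      intro e t ht
      simp [pvRunExt, h] at ht
      rw [← ht.1]; exact h

-- pairs of a run of k+1 copies of c followed by a suffix not starting with c.
theorem pvPairs_run (c : Char) : ∀ (k : Nat) (r : List Char), (∀ d t, r = d :: t → d ≠ c) →
    pvPairs (List.replicate (k + 1) c ++ r) = (k + 1) / 2 + pvPairs r := by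
  intro k
  induction k using Nat.strong_induction_on with
  | _ k ih =>
    intro r hr
    match k with
    | 0 =>
      cases r with
      | nil => simp [pvPairs]
      | cons d t =>
        have hd : d ≠ c := hr d t rfl
        simp [pvPairs, Ne.symm hd]
    | 1 => simp [List.replicate_succ, pvPairs]
    | (m + 2) =>
      have h := ih m (by omega) r hr
      have e : List.replicate (m + 2 + 1) c ++ r = c :: c :: (List.replicate (m + 1) c ++ r) := by
        simp [List.replicate_succ]
      rw [e]
      simp [pvPairs, h]
      omega

theorem pvRunLengths_nil : pvRunLengths [] = [] := by
  unfold pvRunLengths; rfl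

theorem pvRunLengths_cons (c : Char) (rest : List Char) :
    pvRunLengths (c :: rest) = (((pvRunExt c rest).1 : Int) + 1) :: pvRunLengths (pvRunExt c rest).2 := by
  rw [pvRunLengths.eq_def]

-- B's run-length sum equals the pair count.
theorem pvRuns_eq_pairs : ∀ (n : Nat) (l : List Char), l.length ≤ n → ∀ (acc : Int),
    ((pvRunLengths l).map (fun k => PySem.Int.floordiv k 2)).foldl (· + ·) acc = acc + pvPairs l := by
  intro n
  induction n with
  | zero =>
    intro l hl acc
    have : l = [] := List.length_eq_zero_iff.mp (Nat.le_zero.mp hl)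
    subst this
    simp [pvRunLengths_nil, pvPairs]
  | succ n ih =>
    intro l hl acc
    cases l with
    | nil => simp [pvRunLengths_nil, pvPairs]
    | cons c rest =>
      obtain ⟨hsh, hhd⟩ := pvRunExt_shape c rest
      have hlen : (pvRunExt c rest).2.length ≤ n := by
        have h1 := pvRunExt_len c rest
        have h2 : rest.length ≤ n := by simpa using Nat.succ_le_succ_iff.mp (by simpa using hl)
        omega
      have hrec := ih (pvRunExt c rest).2 hlen (acc + PySem.Int.floordiv ((pvRunExt c rest).1 + 1) 2)
      have hpairs : pvPairs (c :: rest) = ((pvRunExt c rest).1 + 1) / 2 + pvPairs (pvRunExt c rest).2 := by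
        have : c :: rest = List.replicate ((pvRunExt c rest).1 + 1) c ++ (pvRunExt c rest).2 := by
          rw [List.replicate_succ]; simp [← hsh]
        rw [this]
        exact pvPairs_run c (pvRunExt c rest).1 (pvRunExt c rest).2 hhd
      have hfd : PySem.Int.floordiv (((pvRunExt c rest).1 : Int) + 1) 2 = (((pvRunExt c rest).1 + 1) / 2 : Nat) := by
        have := PySem.Int.floordiv_natCast ((pvRunExt c rest).1 + 1) 2
        simpa using this
      rw [pvRunLengths_cons]
      simp only [List.map, List.foldl]
      rw [hrec, hpairs, hfd]
      push_cast
      ring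

-- ===== VERDICT (by name: the statement is the Claim_ definition above) =====
theorem has_two_pairs_spec : Claim_equal_has_two_pairs := by
  intro password _
  unfold Spec_has_two_pairs has_two_pairs has_two_pairs_alt
  have hA := (pvALoop_spec password.toList.length password.toList le_rfl 0 (Or.inl rfl)).1
  have hB := pvRuns_eq_pairs password.toList.length password.toList le_rfl 0
  rw [hA, hB]
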